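-- pv_equiv track=rewrite | github.com/jitendra77/StockWatchBoard | portfolio_optimizer.py | find_common_expiry_dates
-- ===== SOURCE A (Python) =====
-- from typing import Dict, List, Any, Tuple, Optional
--
-- def find_common_expiry_dates(options_data: Dict[str, Dict[str, List[Dict]]]) -> List[str]:
--     """Find expiry dates that are common across all symbols"""
--     if not options_data:
--         return []
--
--     # Get expiry dates for each symbol
--     symbol_expiries = []
--     for symbol, expiry_dict in options_data.items():
--         symbol_expiries.append(set(expiry_dict.keys()))
--
--     # Find intersection of all sets
--     common_expiries = symbol_expiries[0]
--     for expiry_set in symbol_expiries[1:]: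
--         common_expiries = common_expiries.intersection(expiry_set)
--
--     return sorted(list(common_expiries))
-- ===== SOURCE B (Python) =====
-- def find_common_expiry_dates(options_data):
--     """Find expiry dates that are common across all symbols (single counting pass)."""
--     n = len(options_data)
--     if n == 0:
--         return []
--     counts = {}
--     for expiry_dict in options_data.values():
--         for date in expiry_dict:
--             counts[date] = counts.get(date, 0) + 1
--     return sorted(date for date, c in counts.items() if c == n)
-- ===== Notes on version B (the rewrite author's own statement) =====
-- stated objective: simpler
-- what changed: Replaces A's build-a-list-of-key-sets then repeated fold of set.intersection with a single counting pass over all symbols' expiry keys, returning the sorted keys whose count equals the number of symbols.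
import Mathlib
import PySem

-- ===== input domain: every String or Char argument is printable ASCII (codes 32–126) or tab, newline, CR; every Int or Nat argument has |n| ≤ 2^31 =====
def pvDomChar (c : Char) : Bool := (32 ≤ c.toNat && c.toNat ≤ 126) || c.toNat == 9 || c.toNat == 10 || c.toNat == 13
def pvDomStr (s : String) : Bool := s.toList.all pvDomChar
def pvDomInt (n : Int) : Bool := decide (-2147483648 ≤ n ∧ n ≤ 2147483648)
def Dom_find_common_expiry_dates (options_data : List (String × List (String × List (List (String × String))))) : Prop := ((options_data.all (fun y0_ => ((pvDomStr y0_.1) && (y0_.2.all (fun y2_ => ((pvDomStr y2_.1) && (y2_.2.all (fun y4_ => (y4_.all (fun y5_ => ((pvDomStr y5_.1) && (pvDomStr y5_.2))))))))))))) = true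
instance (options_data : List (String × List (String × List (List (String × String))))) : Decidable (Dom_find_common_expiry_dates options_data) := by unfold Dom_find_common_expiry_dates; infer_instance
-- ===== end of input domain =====

-- B replaces the list-of-sets + repeated set.intersection of A by one counting pass
-- (a key is common iff its across-symbols count equals the number of symbols); objective: simpler.

-- ===== PORT A =====
def find_common_expiry_dates (options_data : List (String × List (String × List (List (String × String))))) : List String :=
  if options_data.isEmpty then []
  else
    -- for symbol, expiry_dict in options_data.items(): symbol_expiries.append(set(expiry_dict.keys()))
    let symbol_expiries : List (PySem.Set String) :=
      options_data.foldl (fun acc p => acc ++ [PySem.Set.ofList (p.2.map Prod.fst)]) []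
    -- common_expiries = symbol_expiries[0]; for expiry_set in symbol_expiries[1:]: … intersection …
    match symbol_expiries with
    | [] => []   -- unreachable: options_data is nonempty here, so symbol_expiries is too
    | s0 :: rest =>
      PySem.List.sorted (rest.foldl (fun c s => PySem.Set.inter c s) s0) (fun x => x) false

-- ===== PORT B =====
def find_common_expiry_dates_alt (options_data : List (String × List (String × List (List (String × String))))) : List String :=
  let n := options_data.length
  if n = 0 then []
  else
    -- counts[date] = counts.get(date, 0) + 1, iterating each expiry_dict's keys
    -- ('for date in expiry_dict' iterates a dict's keys: first occurrences, deduplicated = PySem.Set.ofList)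
    let counts : PySem.Dict String Int :=
      options_data.foldl
        (fun d p => (PySem.Set.ofList (p.2.map Prod.fst)).foldl (fun d k => d.modify k 0 (· + 1)) d)
        PySem.Dict.empty
    -- sorted(date for date, c in counts.items() if c == n)
    PySem.List.sorted ((counts.items.filter (fun kc => kc.2 == (n : Int))).map Prod.fst) (fun x => x) false

-- ===== PRECONDITION & SPEC =====
def Spec_find_common_expiry_dates (options_data : List (String × List (String × List (List (String × String))))) (out : List String) : Prop := out = find_common_expiry_dates_alt options_data
instance (options_data : List (String × List (String × List (List (String × String))))) (out : List String) : Decidable (Spec_find_common_expiry_dates options_data out) := by unfold Spec_find_common_expiry_dates; infer_instance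

-- ===== CLAIM (what is proved, stated in full; the proofs are below) =====
def Claim_equal_find_common_expiry_dates : Prop := ∀ (options_data : List (String × List (String × List (List (String × String))))), Dom_find_common_expiry_dates options_data → Spec_find_common_expiry_dates options_data (find_common_expiry_dates options_data)

-- ===== LEMMAS AND PROOFS =====

theorem pvInterEqFilter (s t : PySem.Set String) :
    PySem.Set.inter s t = s.filter (fun x => t.contains x) := by
  simp [PySem.Set.inter]

theorem pvNodupFoldlInter (l : List (PySem.Set String)) (s : PySem.Set String)
    (h : s.Nodup) : (l.foldl PySem.Set.inter s).Nodup := by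
  induction l generalizing s with
  | nil => exact h
  | cons t l ih =>
      simp only [List.foldl_cons]
      exact ih _ (by rw [pvInterEqFilter]; exact h.filter _)

theorem pvMemFoldlInter (l : List (PySem.Set String)) (s : PySem.Set String) (x : String) :
    x ∈ l.foldl PySem.Set.inter s ↔ x ∈ s ∧ ∀ t ∈ l, x ∈ t := by
  induction l generalizing s with
  | nil => simp
  | cons t l ih =>
      simp only [List.foldl_cons, ih, PySem.Set.mem_inter, List.mem_cons]
      constructor
      · rintro ⟨⟨hs, ht⟩, hall⟩
        exact ⟨hs, fun u hu => hu.elim (fun e => e ▸ ht) (hall u)⟩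
      · rintro ⟨hs, hall⟩
        exact ⟨⟨hs, hall t (Or.inl rfl)⟩, fun u hu => hall u (Or.inr hu)⟩

theorem pvCountFlatMap (od : List (String × List (String × List (List (String × String)))))
    (x : String) :
    (od.flatMap (fun q => PySem.Set.ofList (q.2.map Prod.fst))).count x
      = od.countP (fun q => decide (x ∈ PySem.Set.ofList (q.2.map Prod.fst))) := by
  induction od with
  | nil => rfl
  | cons p ps ih =>
      rw [List.flatMap_cons, List.count_append, List.countP_cons, ih]
      by_cases hx : x ∈ PySem.Set.ofList (p.2.map Prod.fst)
      · rw [List.count_eq_one_of_mem (PySem.Set.nodup_ofList _) hx]; simp [hx]; omega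
      · rw [List.count_eq_zero_of_not_mem hx]; simp [hx]

theorem pvFilterMapFst (l : List String) (g : String → Int) (n : Int) :
    ((l.map (fun k => (k, g k))).filter (fun kc => kc.2 == n)).map Prod.fst
      = l.filter (fun k => g k == n) := by
  induction l with
  | nil => rfl
  | cons a l ih =>
      by_cases h : g a == n <;> simp [h, ih]

theorem pvKey (p : String × List (String × List (List (String × String))))
    (ps : List (String × List (String × List (List (String × String))))) :
    ((ps.map (fun q => PySem.Set.ofList (q.2.map Prod.fst))).foldl PySem.Set.inter
        (PySem.Set.ofList (p.2.map Prod.fst))).Perm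
      ((PySem.Set.ofList ((p :: ps).flatMap (fun q => PySem.Set.ofList (q.2.map Prod.fst)))).filter
        (fun k => ((((p :: ps).flatMap (fun q => PySem.Set.ofList (q.2.map Prod.fst))).count k : Int))
            == (((p :: ps).length : Nat) : Int))) := by
  apply (List.perm_ext_iff_of_nodup
      (pvNodupFoldlInter _ _ (PySem.Set.nodup_ofList _))
      ((PySem.Set.nodup_ofList _).filter _)).mpr
  intro x
  simp only [pvMemFoldlInter, List.mem_filter, PySem.Set.mem_ofList]
  have hcast : ∀ a b : Nat, (((a : Int)) == ((b : Int))) = true ↔ a = b := by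
    intro a b; simp
  rw [pvCountFlatMap, hcast]
  constructor
  · rintro ⟨hp, hrest⟩
    have hall : ∀ q ∈ p :: ps, x ∈ q.2.map Prod.fst := by
      intro q hq
      rcases List.mem_cons.mp hq with rfl | hq
      · exact hp
      · exact (PySem.Set.mem_ofList _ _).mp (hrest _ (List.mem_map_of_mem hq))
    refine ⟨List.mem_flatMap.mpr ⟨p, List.mem_cons_self,
      (PySem.Set.mem_ofList _ _).mpr hp⟩, ?_⟩
    rw [List.countP_eq_length]
    intro q hq; exact decide_eq_true ((PySem.Set.mem_ofList _ _).mpr (hall q hq))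
  · rintro ⟨_, hcnt⟩
    have hall := List.countP_eq_length.mp hcnt
    refine ⟨(PySem.Set.mem_ofList _ _).mp (of_decide_eq_true (hall p List.mem_cons_self)), ?_⟩
    intro t ht
    rcases List.mem_map.mp ht with ⟨q, hq, rfl⟩
    exact of_decide_eq_true (hall q (List.mem_cons_of_mem _ hq))

-- ===== VERDICT (by name: the statement is the Claim_ definition above) =====
theorem find_common_expiry_dates_spec : Claim_equal_find_common_expiry_dates := by
  unfold Claim_equal_find_common_expiry_dates
  intro od _
  unfold Spec_find_common_expiry_dates
  cases od with
  | nil => rfl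
  | cons p ps =>
      have hA : find_common_expiry_dates (p :: ps)
          = PySem.List.sorted
              ((ps.map (fun q => PySem.Set.ofList (q.2.map Prod.fst))).foldl
                (fun c s => PySem.Set.inter c s) (PySem.Set.ofList (p.2.map Prod.fst)))
              (fun x => x) false := by
        unfold find_common_expiry_dates
        rw [if_neg (by simp), PySem.List.foldl_append_singleton_eq_map]
        rfl
      have hB : find_common_expiry_dates_alt (p :: ps)
          = PySem.List.sorted
              ((((PySem.Dict.counter
                    ((p :: ps).flatMap (fun q => PySem.Set.ofList (q.2.map Prod.fst)))).items.filter
                  (fun kc => kc.2 == (((p :: ps).length : Nat) : Int))).map Prod.fst))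
              (fun x => x) false := by
        unfold find_common_expiry_dates_alt
        rw [if_neg (by simp),
          show ((p :: ps).foldl
              (fun d q => (PySem.Set.ofList (q.2.map Prod.fst)).foldl
                (fun d k => d.modify k 0 (· + 1)) d) PySem.Dict.empty)
            = PySem.Dict.counter
                ((p :: ps).flatMap (fun q => PySem.Set.ofList (q.2.map Prod.fst))) from by
            rw [PySem.Dict.counter_eq_foldl, List.foldl_flatMap]]
      rw [hA, hB, PySem.Dict.items_counter,
        pvFilterMapFst _ (fun k =>
          ((((p :: ps).flatMap (fun q => PySem.Set.ofList (q.2.map Prod.fst))).count k : Int))) _]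
      exact (PySem.List.sorted_id_eq_sorted_id_iff_perm _ _).mpr (pvKey p ps)
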